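-- pv_equiv track=rewrite | github.com/kleix5/journal | jourtools.py | student_choice
-- ===== SOURCE A (Python) =====
-- def student_choice(number: int, field: dict) -> str:
--     check_list = []
--     count = 1
--     for k, v in field.items():
--         check_list.append((count, k))
--         count += 1
--     for i in check_list:
--         if i[0] == number:
--             return i[1]
-- ===== SOURCE B (Python) =====
-- def student_choice(number: int, field: dict) -> str:
--     keys = list(field)
--     if 1 <= number <= len(keys):
--         return keys[number - 1]
-- ===== Notes on version B (the rewrite author's own statement) =====
-- stated objective: simpler
-- what changed: B replaces A's two passes (build a (position,key) list, then linearly scan it for the matching position) with one keys-list materialisation and a direct bounds-checked positional index.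
import Mathlib
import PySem

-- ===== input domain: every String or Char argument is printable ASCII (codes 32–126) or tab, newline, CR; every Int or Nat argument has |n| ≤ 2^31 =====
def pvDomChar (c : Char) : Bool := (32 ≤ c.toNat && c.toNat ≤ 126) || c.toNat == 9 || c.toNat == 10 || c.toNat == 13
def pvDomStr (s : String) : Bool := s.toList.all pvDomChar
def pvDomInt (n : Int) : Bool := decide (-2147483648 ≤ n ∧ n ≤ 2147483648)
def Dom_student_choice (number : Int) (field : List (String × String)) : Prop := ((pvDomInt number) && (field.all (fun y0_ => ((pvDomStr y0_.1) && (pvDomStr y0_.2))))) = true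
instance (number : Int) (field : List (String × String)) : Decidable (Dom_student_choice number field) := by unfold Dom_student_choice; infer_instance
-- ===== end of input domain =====

-- B replaces A's two passes (enumerate keys with positions, then scan for the position) with a
-- bounds-checked direct positional index into the keys list; same return value everywhere.


-- ===== PORT A =====
-- second loop of A: first pair whose position equals number, else fall through to None
def student_choice_scan (number : Int) : List (Int × String) → Option String
  | [] => none
  | i :: rest => if i.1 == number then some i.2 else student_choice_scan number rest

def student_choice (number : Int) (field : List (String × String)) : Option String :=
  let st := field.foldl (fun (acc : List (Int × String) × Int) kv =>
      (acc.1 ++ [(acc.2, kv.1)], acc.2 + 1)) ([], 1)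
  student_choice_scan number st.1

-- ===== PORT B =====
def student_choice_alt (number : Int) (field : List (String × String)) : Option String :=
  let keys := field.map Prod.fst
  if 1 ≤ number ∧ number ≤ (keys.length : Int) then
    PySem.List.pyGet? keys (number - 1)
  else
    none

-- ===== PRECONDITION & SPEC =====
def Spec_student_choice (number : Int) (field : List (String × String)) (out : Option String) : Prop := out = student_choice_alt number field
instance (number : Int) (field : List (String × String)) (out : Option String) : Decidable (Spec_student_choice number field out) := by unfold Spec_student_choice; infer_instance

-- ===== CLAIM (what is proved, stated in full; the proofs are below) =====
def Claim_equal_student_choice : Prop := ∀ (number : Int) (field : List (String × String)), Dom_student_choice number field → Spec_student_choice number field (student_choice number field)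

-- ===== LEMMAS AND PROOFS =====

-- the enumerated list A builds, generalised over the starting counter
def scEnumFrom (c : Int) : List String → List (Int × String)
  | [] => []
  | k :: ks => (c, k) :: scEnumFrom (c + 1) ks

theorem sc_fold_eq (field : List (String × String)) :
    ∀ (acc : List (Int × String)) (c : Int),
      field.foldl (fun (acc : List (Int × String) × Int) kv =>
        (acc.1 ++ [(acc.2, kv.1)], acc.2 + 1)) (acc, c)
      = (acc ++ scEnumFrom c (field.map Prod.fst), c + field.length) := by
  induction field with
  | nil => intro acc c; simp [scEnumFrom]
  | cons kv rest ih =>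
      intro acc c
      simp only [List.foldl_cons, ih, List.map_cons, scEnumFrom, List.length_cons,
        Prod.mk.injEq]
      exact ⟨by simp, by push_cast; ring⟩

theorem sc_scan_enum (keys : List String) :
    ∀ (c number : Int),
      student_choice_scan number (scEnumFrom c keys)
      = if c ≤ number ∧ number < c + (keys.length : Int) then
          keys[(number - c).toNat]?
        else none := by
  induction keys with
  | nil => intro c number; simp [scEnumFrom, student_choice_scan]
  | cons k ks ih =>
      intro c number
      simp only [scEnumFrom, student_choice_scan]
      by_cases h : c = number
      · subst h
        simp only [beq_self_eq_true, if_true]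
        rw [if_pos ⟨le_refl _, by simp only [List.length_cons]; push_cast; omega⟩]
        simp
      · rw [if_neg (by simpa using fun h' => h h')]
        rw [ih (c + 1) number]
        by_cases h1 : c + 1 ≤ number ∧ number < c + 1 + (ks.length : Int)
        · rw [if_pos h1, if_pos (by simp only [List.length_cons] at h1 ⊢; push_cast at h1 ⊢; omega)]
          have : (number - c).toNat = (number - (c+1)).toNat + 1 := by omega
          simp [this]
        · rw [if_neg h1, if_neg (by simp only [List.length_cons] at h1 ⊢; push_cast at h1 ⊢; omega)]

-- ===== VERDICT (by name: the statement is the Claim_ definition above) =====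
theorem student_choice_spec : Claim_equal_student_choice := by
  intro number field _
  unfold Spec_student_choice student_choice student_choice_alt
  simp only []
  have hf := sc_fold_eq field [] 1
  rw [hf]
  simp only [List.nil_append]
  rw [sc_scan_enum (field.map Prod.fst) 1 number]
  by_cases h : 1 ≤ number ∧ number ≤ ((field.map Prod.fst).length : Int)
  · rw [if_pos (by omega), if_pos h]
    rw [PySem.List.pyGet?_of_nonneg _ (by omega)]
  · rw [if_neg (by omega), if_neg h]
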